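-- pv_equiv track=rewrite | github.com/jnicolow/change_tiff_resolution | opensr_fourway.py | find_band_index
-- ===== SOURCE A (Python) =====
-- from typing import Dict, List, Tuple
--
-- def _normalize_name(name: str) -> str:
--     return "".join(ch for ch in name.lower() if ch.isalnum())
--
-- def _band_aliases() -> Dict[str, Tuple[str, ...]]:
--     return {
--         "blue": ("blue", "b", "band2", "b2"),
--         "green": ("green", "g", "band3", "b3"),
--         "red": ("red", "r", "band4", "b4"),
--         "nir": ("nir", "nearinfrared", "nearir", "band5", "b5", "nir08", "nir1"),
--     }
--
-- def find_band_index(band_names: List[str], key: str) -> int: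
--     aliases = tuple(_normalize_name(a) for a in _band_aliases()[key])
--     normalized = [_normalize_name(n) for n in band_names]
--     for idx, n in enumerate(normalized):
--         if n in aliases:
--             return idx
--     for idx, n in enumerate(normalized):
--         if any(a in n for a in aliases):
--             return idx
--     raise ValueError(f"Could not find band '{key}' in names: {band_names}")
-- ===== SOURCE B (Python) =====
-- from typing import Dict, List, Tuple
--
-- def _normalize_name(name: str) -> str:
--     return "".join(ch for ch in name.lower() if ch.isalnum())
--
-- def _band_aliases() -> Dict[str, Tuple[str, ...]]:
--     return {
--         "blue": ("blue", "b", "band2", "b2"),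
--         "green": ("green", "g", "band3", "b3"),
--         "red": ("red", "r", "band4", "b4"),
--         "nir": ("nir", "nearinfrared", "nearir", "band5", "b5", "nir08", "nir1"),
--     }
--
-- def find_band_index(band_names: List[str], key: str) -> int:
--     aliases = tuple(_normalize_name(a) for a in _band_aliases()[key])
--
--     def score(name: str) -> int:
--         n = _normalize_name(name)
--         if n in aliases:
--             return 0
--         if any(a in n for a in aliases):
--             return 1
--         return 2
--
--     best = min(((score(n), i) for i, n in enumerate(band_names)), default=(2, 0))
--     if best[0] == 2:
--         raise ValueError(f"Could not find band '{key}' in names: {band_names}")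
--     return best[1]
-- ===== Notes on version B (the rewrite author's own statement) =====
-- stated objective: alternative
-- what changed: Instead of two staged priority scans, B assigns each name a rank (0 exact alias, 1 substring match, 2 none) and takes the lexicographic minimum of (rank, index) pairs in one min() reduction, returning the index unless the best rank is 2.
import Mathlib
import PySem

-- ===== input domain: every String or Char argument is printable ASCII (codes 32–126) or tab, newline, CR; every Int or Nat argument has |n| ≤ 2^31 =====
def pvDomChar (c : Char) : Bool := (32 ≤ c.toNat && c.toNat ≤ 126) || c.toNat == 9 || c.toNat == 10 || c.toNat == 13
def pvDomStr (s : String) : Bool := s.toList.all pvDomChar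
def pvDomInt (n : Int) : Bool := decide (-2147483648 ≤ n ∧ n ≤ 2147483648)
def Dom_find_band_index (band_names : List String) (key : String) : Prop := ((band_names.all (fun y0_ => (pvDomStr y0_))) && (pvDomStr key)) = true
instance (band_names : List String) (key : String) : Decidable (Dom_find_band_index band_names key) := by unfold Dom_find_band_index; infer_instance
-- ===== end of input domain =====

-- B replaces A's two staged priority scans by a rank-and-minimum reduction: each name gets a
-- rank (0 exact alias, 1 substring, 2 none) and B returns the lexicographically least
-- (rank, index) pair's index; same value wherever A returns (objective: alternative).


-- ===== PORT A =====
-- _normalize_name: lowercase then keep alphanumeric chars (kept as List Char; Python compares the strings)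
def pvNormA (s : String) : List Char := (PySem.Chars.lower s.toList).filter PySem.Chars.isalnum

-- _band_aliases()[key]; [] stands for the KeyError case (excluded by Pre_)
def pvAliasesA (key : String) : List String :=
  if key = "blue" then ["blue", "b", "band2", "b2"]
  else if key = "green" then ["green", "g", "band3", "b3"]
  else if key = "red" then ["red", "r", "band4", "b4"]
  else if key = "nir" then ["nir", "nearinfrared", "nearir", "band5", "b5", "nir08", "nir1"]
  else []

-- first loop: first index whose normalized name IS an alias
def pvScanExact (al : List (List Char)) (idx : Int) : List (List Char) → Option Int
  | [] => none
  | n :: rest => if al.contains n then some idx else pvScanExact al (idx + 1) rest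

-- second loop: first index whose normalized name CONTAINS an alias
def pvScanSub (al : List (List Char)) (idx : Int) : List (List Char) → Option Int
  | [] => none
  | n :: rest =>
      if al.any (fun a => PySem.Chars.isIn a n) then some idx else pvScanSub al (idx + 1) rest

def find_band_index (band_names : List String) (key : String) : Int :=
  let aliases := (pvAliasesA key).map pvNormA
  let normalized := band_names.map pvNormA
  match pvScanExact aliases 0 normalized with
  | some i => i
  | none =>
      match pvScanSub aliases 0 normalized with
      | some i => i
      | none => -1  -- Python raises ValueError here; excluded by Pre_

-- ===== PORT B =====
def pvNormB (s : String) : List Char := (PySem.Chars.lower s.toList).filter PySem.Chars.isalnum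

-- the alias dict ported as an association list, looked up by key (KeyError → default [])
def pvAliasTable : List (String × List String) :=
  [("blue", ["blue", "b", "band2", "b2"]),
   ("green", ["green", "g", "band3", "b3"]),
   ("red", ["red", "r", "band4", "b4"]),
   ("nir", ["nir", "nearinfrared", "nearir", "band5", "b5", "nir08", "nir1"])]

def pvAliasesB (key : String) : List String := (pvAliasTable.lookup key).getD []

-- score(name): 0 exact alias, 1 substring hit, 2 no match
def pvScore (al : List (List Char)) (n : List Char) : Int :=
  if al.contains n then 0
  else if al.any (fun a => PySem.Chars.isIn a n) then 1
  else 2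

-- lexicographic strict < on (rank, index) pairs, as Python tuple comparison
def pvLt (a b : Int × Int) : Bool := a.1 < b.1 || (a.1 == b.1 && a.2 < b.2)

-- min() over the generator of (score, index) pairs, as a fold keeping the least pair
def pvBest (al : List (List Char)) (idx : Int) (best : Int × Int) : List String → Int × Int
  | [] => best
  | name :: rest =>
      let c := (pvScore al (pvNormB name), idx)
      pvBest al (idx + 1) (if pvLt c best then c else best) rest

def find_band_index_alt (band_names : List String) (key : String) : Int :=
  let aliases := (pvAliasesB key).map pvNormB
  let best := pvBest aliases 0 (2, 0) band_names
  if best.1 == 2 then -1  -- Python raises ValueError here; excluded by Pre_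
  else best.2

-- ===== PRECONDITION & SPEC =====
-- Pre_ excludes exactly the inputs where A raises: KeyError when key is not an alias-dict key,
-- ValueError when no normalized band name contains (hence also is) a normalized alias.
def pvKeyAliases (key : String) : List String :=
  if key = "blue" then ["blue", "b", "band2", "b2"]
  else if key = "green" then ["green", "g", "band3", "b3"]
  else if key = "red" then ["red", "r", "band4", "b4"]
  else if key = "nir" then ["nir", "nearinfrared", "nearir", "band5", "b5", "nir08", "nir1"]
  else []

def pvNormP (s : String) : List Char := (PySem.Chars.lower s.toList).filter PySem.Chars.isalnum

def Pre_find_band_index (band_names : List String) (key : String) : Prop :=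
  (key = "blue" ∨ key = "green" ∨ key = "red" ∨ key = "nir") ∧
  (band_names.any (fun n =>
      (pvKeyAliases key).any (fun a => PySem.Chars.isIn (pvNormP a) (pvNormP n)))) = true
instance (band_names : List String) (key : String) : Decidable (Pre_find_band_index band_names key) := by unfold Pre_find_band_index; infer_instance

def pvWitness_find_band_index : List String × String := (["coastal", "Red band"], "red")

def Spec_find_band_index (band_names : List String) (key : String) (out : Int) : Prop := out = find_band_index_alt band_names key
instance (band_names : List String) (key : String) (out : Int) : Decidable (Spec_find_band_index band_names key out) := by unfold Spec_find_band_index; infer_instance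

-- ===== CLAIM (what is proved, stated in full; the proofs are below) =====
def Claim_equal_find_band_index : Prop := ∀ (band_names : List String) (key : String), Dom_find_band_index band_names key → Pre_find_band_index band_names key → Spec_find_band_index band_names key (find_band_index band_names key)

-- ===== LEMMAS AND PROOFS =====

-- once the best pair has rank 0 with an index below the cursor, the fold never changes it
theorem pvBest_frozen (al : List (List Char)) :
    ∀ (ns : List String) (idx j : Int), j < idx → pvBest al idx (0, j) ns = (0, j)
  | [], _, _, _ => rfl
  | name :: rest, idx, j, hj => by
      have hlt : pvLt (pvScore al (pvNormB name), idx) (0, j) = false := by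
        unfold pvScore pvLt
        split_ifs <;> simp <;> omega
      simp only [pvBest, hlt, if_false, Bool.false_eq_true]
      exact pvBest_frozen al rest (idx + 1) j (by omega)

-- with a rank-1 best below the cursor, the fold only improves on a later exact match
theorem pvBest_one (al : List (List Char)) :
    ∀ (ns : List String) (idx j : Int), j < idx →
      pvBest al idx (1, j) ns =
        match pvScanExact al idx (ns.map pvNormA) with
        | some i => (0, i)
        | none => (1, j)
  | [], _, _, _ => by simp [pvBest, pvScanExact]
  | name :: rest, idx, j, hj => by
      have hnorm : pvNormB name = pvNormA name := rfl
      by_cases hex : pvNormA name ∈ al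
      · have hs : pvScore al (pvNormB name) = 0 := by simp [pvScore, hnorm, hex]
        have hlt : pvLt ((0 : Int), idx) (1, j) = true := by simp [pvLt]
        simp only [pvBest, hs, hlt, if_true]
        rw [pvBest_frozen al rest (idx + 1) idx (by omega)]
        simp [pvScanExact, hex]
      · have hlt : pvLt (pvScore al (pvNormB name), idx) (1, j) = false := by
          unfold pvScore pvLt
          simp only [hnorm]
          split_ifs <;> simp_all <;> omega
        simp only [pvBest, hlt, if_false, Bool.false_eq_true]
        rw [pvBest_one al rest (idx + 1) j (by omega)]
        simp [pvScanExact, hex]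

-- the fold from a rank-2 default computes: first exact match, else first substring match, else the default
theorem pvBest_main (al : List (List Char)) :
    ∀ (ns : List String) (idx d : Int), d ≤ idx →
      pvBest al idx (2, d) ns =
        match pvScanExact al idx (ns.map pvNormA) with
        | some i => (0, i)
        | none =>
            match pvScanSub al idx (ns.map pvNormA) with
            | some i => (1, i)
            | none => (2, d)
  | [], _, _, _ => by simp [pvBest, pvScanExact, pvScanSub]
  | name :: rest, idx, d, hd => by
      have hnorm : pvNormB name = pvNormA name := rfl
      by_cases hex : pvNormA name ∈ al
      · have hs : pvScore al (pvNormB name) = 0 := by simp [pvScore, hnorm, hex]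
        have hlt : pvLt ((0 : Int), idx) (2, d) = true := by simp [pvLt]
        simp only [pvBest, hs, hlt, if_true]
        rw [pvBest_frozen al rest (idx + 1) idx (by omega)]
        simp [pvScanExact, hex]
      · by_cases hsub : ∃ a ∈ al, PySem.Chars.isIn a (pvNormA name) = true
        · have hs : pvScore al (pvNormB name) = 1 := by simp [pvScore, hnorm, hex, hsub]
          have hlt : pvLt ((1 : Int), idx) (2, d) = true := by simp [pvLt]
          simp only [pvBest, hs, hlt, if_true]
          rw [pvBest_one al rest (idx + 1) idx (by omega)]
          simp only [List.map, pvScanExact, pvScanSub]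
          simp [hex, hsub]
        · have hs : pvScore al (pvNormB name) = 2 := by simp [pvScore, hnorm, hex, hsub]
          have hlt : pvLt ((2 : Int), idx) (2, d) = false := by
            simp [pvLt]; omega
          simp only [pvBest, hs, hlt, if_false, Bool.false_eq_true]
          rw [pvBest_main al rest (idx + 1) d (by omega)]
          simp [pvScanExact, pvScanSub, hex, hsub]

theorem pvAliases_eq (key : String) : pvAliasesB key = pvAliasesA key := by
  by_cases h1 : key = "blue"
  · subst h1; rfl
  by_cases h2 : key = "green"
  · subst h2; rfl
  by_cases h3 : key = "red"
  · subst h3; rfl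
  by_cases h4 : key = "nir"
  · subst h4; rfl
  unfold pvAliasesB pvAliasesA pvAliasTable
  simp only [List.lookup]
  rw [show (key == "blue") = false by simp [h1],
      show (key == "green") = false by simp [h2],
      show (key == "red") = false by simp [h3],
      show (key == "nir") = false by simp [h4]]
  simp [List.lookup, h1, h2, h3, h4]

theorem find_band_index_eq_alt (band_names : List String) (key : String) :
    find_band_index band_names key = find_band_index_alt band_names key := by
  have hmap : (pvAliasesB key).map pvNormB = (pvAliasesA key).map pvNormA := by
    rw [pvAliases_eq]; rfl
  simp only [find_band_index, find_band_index_alt, hmap]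
  rw [pvBest_main ((pvAliasesA key).map pvNormA) band_names 0 0 le_rfl]
  cases pvScanExact ((pvAliasesA key).map pvNormA) 0 (band_names.map pvNormA) with
  | some i => rfl
  | none =>
      cases pvScanSub ((pvAliasesA key).map pvNormA) 0 (band_names.map pvNormA) <;> rfl

-- ===== VERDICT (by name: the statement is the Claim_ definition above) =====
theorem find_band_index_spec : Claim_equal_find_band_index := by
  intro band_names key _ _
  unfold Spec_find_band_index
  exact find_band_index_eq_alt band_names key
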